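-- pv_equiv track=rewrite | github.com/bsubercaseaux/PackingChromaticTacas | src/plotter.py | mat_from_coloring
-- ===== SOURCE A (Python) =====
-- def mat_from_coloring(coloring, radius):
--     mat = [[-10 for _ in range(2*radius+1)] for _ in range(2*radius+1)]
--     for i in range(-radius, radius+1):
--         for j in range(-radius, radius+1):
--             if abs(i) + abs(j) <= radius:
--                 mat[i+radius][j+radius] = 0
--     for key, val in coloring.items():
--         i, j = key
--         mat[i+radius][j+radius] = val
--     return mat
-- ===== SOURCE B (Python) =====
-- def mat_from_coloring(coloring, radius):
--     mat = []
--     for i in range(-radius, radius+1):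
--         b = radius - abs(i)
--         mat.append([-10]*abs(i) + [0]*(2*b+1) + [-10]*abs(i))
--     for key, val in coloring.items():
--         i, j = key
--         mat[i+radius][j+radius] = val
--     return mat
-- ===== Notes on version B (the rewrite author's own statement) =====
-- stated objective: simpler
-- what changed: Each row of the diamond matrix is built in closed form from arithmetic segment lengths ([-10]*|i| + [0]*(2*(radius-|i|)+1) + [-10]*|i|) instead of allocating a full -10 grid and rescanning every cell with an abs(i)+abs(j)<=radius test; the coloring-application loop is unchanged.
import Mathlib
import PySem

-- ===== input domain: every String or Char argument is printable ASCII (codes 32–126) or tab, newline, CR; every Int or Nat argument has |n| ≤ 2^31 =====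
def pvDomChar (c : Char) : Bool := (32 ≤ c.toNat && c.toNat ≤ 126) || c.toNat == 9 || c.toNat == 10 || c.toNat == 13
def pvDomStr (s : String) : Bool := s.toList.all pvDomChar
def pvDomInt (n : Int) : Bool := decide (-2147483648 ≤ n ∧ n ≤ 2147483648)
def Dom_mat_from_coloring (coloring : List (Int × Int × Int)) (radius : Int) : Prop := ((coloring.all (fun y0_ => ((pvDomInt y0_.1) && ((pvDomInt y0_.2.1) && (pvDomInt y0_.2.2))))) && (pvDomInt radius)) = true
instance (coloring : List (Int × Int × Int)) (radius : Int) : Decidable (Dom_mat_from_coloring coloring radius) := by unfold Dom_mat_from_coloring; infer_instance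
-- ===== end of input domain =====

-- B builds each row of the diamond matrix in closed form from segment lengths instead of
-- scanning every cell with an abs(i)+abs(j)<=radius test; the coloring loop is unchanged.
-- (A mutates nothing observable; equivalence is about the return value.)


-- ===== PORT A =====
-- shared by both ports: the final 'for key, val in coloring.items(): mat[i+radius][j+radius] = val'
-- loop, identical in Source A and Source B (pySetD/pyGetD: Python index semantics, in range under Pre_).
def applyColoring (coloring : List (Int × Int × Int)) (radius : Int)
    (mat : List (List Int)) : List (List Int) :=
  coloring.foldl (fun m p =>
    PySem.List.pySetD m (p.1 + radius)
      (PySem.List.pySetD (PySem.List.pyGetD m (p.1 + radius) []) (p.2.1 + radius) p.2.2)) mat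

def mat_from_coloring (coloring : List (Int × Int × Int)) (radius : Int) : List (List Int) :=
  let mat0 : List (List Int) :=
    List.replicate (2*radius+1).toNat (List.replicate (2*radius+1).toNat (-10))
  let mat1 :=
    (PySem.List.pyRange (-radius) (radius+1) 1).foldl (fun m i =>
      (PySem.List.pyRange (-radius) (radius+1) 1).foldl (fun m j =>
        if |i| + |j| ≤ radius then
          PySem.List.pySetD m (i + radius)
            (PySem.List.pySetD (PySem.List.pyGetD m (i + radius) []) (j + radius) 0)
        else m) m) mat0
  applyColoring coloring radius mat1

-- ===== PORT B =====
def mat_from_coloring_alt (coloring : List (Int × Int × Int)) (radius : Int) : List (List Int) :=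
  let base :=
    (PySem.List.pyRange (-radius) (radius+1) 1).map (fun i =>
      List.replicate (|i|).toNat (-10)
        ++ List.replicate (2*(radius - |i|) + 1).toNat 0
        ++ List.replicate (|i|).toNat (-10))
  applyColoring coloring radius base

-- ===== PRECONDITION & SPEC =====
-- Pre_ excludes exactly the inputs where Python A raises IndexError: a coloring key whose
-- row or column index falls outside Python's (wrap-allowing) index range of the (2r+1)-grid.
def Pre_mat_from_coloring (coloring : List (Int × Int × Int)) (radius : Int) : Prop :=
  ∀ p ∈ coloring, PySem.Raise.InRange (2*radius+1).toNat (p.1 + radius) ∧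
    PySem.Raise.InRange (2*radius+1).toNat (p.2.1 + radius)
instance (coloring : List (Int × Int × Int)) (radius : Int) : Decidable (Pre_mat_from_coloring coloring radius) := by unfold Pre_mat_from_coloring; infer_instance
def pvWitness_mat_from_coloring : (List (Int × Int × Int)) × Int := ([(0, 0, 3), (-1, 1, 2)], 1)
def Spec_mat_from_coloring (coloring : List (Int × Int × Int)) (radius : Int) (out : List (List Int)) : Prop := out = mat_from_coloring_alt coloring radius
instance (coloring : List (Int × Int × Int)) (radius : Int) (out : List (List Int)) : Decidable (Spec_mat_from_coloring coloring radius out) := by unfold Spec_mat_from_coloring; infer_instance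

-- ===== CLAIM (what is proved, stated in full; the proofs are below) =====
def Claim_equal_mat_from_coloring : Prop := ∀ (coloring : List (Int × Int × Int)) (radius : Int), Dom_mat_from_coloring coloring radius → Pre_mat_from_coloring coloring radius → Spec_mat_from_coloring coloring radius (mat_from_coloring coloring radius)

-- ===== LEMMAS AND PROOFS =====

-- read-modify-write fold at a fixed row index
theorem foldl_set_getD (c : Int → Prop) [DecidablePred c] (g : List Int → Int → List Int) (a : Nat) :
    ∀ (js : List Int) (mat : List (List Int)), a < mat.length →
    js.foldl (fun m j => if c j then m.set a (g (m.getD a []) j) else m) mat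
      = mat.set a (js.foldl (fun row j => if c j then g row j else row) (mat.getD a [])) := by
  intro js
  induction js with
  | nil =>
    intro mat ha
    simp only [List.foldl_nil]
    rw [List.getD_eq_getElem _ _ ha, List.set_getElem_self]
  | cons j js ih =>
    intro mat ha
    by_cases hc : c j
    · simp only [List.foldl_cons, if_pos hc]
      rw [ih _ (by simpa using ha)]
      rw [List.set_set]
      congr 1
      rw [List.getD_eq_getElem _ _ (by simpa using ha)]
      simp
    · simp only [List.foldl_cons, if_neg hc]
      exact ih _ ha

-- segments of the row loop where the diamond test fails leave the row unchanged
theorem foldl_row_noop (radius A : Int) (g : List Int → Int → List Int) :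
    ∀ (js : List Int), (∀ j ∈ js, ¬ (A + |j| ≤ radius)) →
    ∀ (row : List Int),
      js.foldl (fun row j => if A + |j| ≤ radius then g row j else row) row = row := by
  intro js
  induction js with
  | nil => intro _ row; simp
  | cons j js ih =>
    intro h row
    simp only [List.foldl_cons, if_neg (h j (by simp))]
    exact ih (fun x hx => h x (by simp [hx])) row

-- the contiguous middle segment of sets fills the zero block
theorem foldl_row_mid (radius m : Int) (h0 : 0 ≤ m) (hmr : m ≤ radius) :
    ∀ (k : Nat) (t : Int), -m ≤ t → t + k = m + 1 →
    (PySem.List.pyRange t (m+1) 1).foldl (fun row j => PySem.List.pySetD row (j+radius) 0)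
      (List.replicate (radius-m).toNat (-10) ++ (List.replicate (t+m).toNat 0 ++ List.replicate (m+1-t + (radius-m)).toNat (-10)))
    = List.replicate (radius-m).toNat (-10) ++ (List.replicate (2*m+1).toNat 0 ++ List.replicate (radius-m).toNat (-10)) := by
  intro k
  induction k with
  | zero =>
    intro t h1 h2
    rw [PySem.List.pyRange_one_eq_nil (by omega)]
    simp only [List.foldl_nil]
    rw [show (t+m).toNat = (2*m+1).toNat by omega, show (m+1-t+(radius-m)).toNat = (radius-m).toNat by omega]
  | succ k ih =>
    intro t h1 h2
    rw [PySem.List.pyRange_one_cons (by omega : t < m+1), List.foldl_cons]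
    rw [PySem.List.pySetD_of_nonneg _ _ (by omega : (0:Int) ≤ t + radius)]
    rw [List.set_append_right _ _ (by simp; omega)]
    rw [List.set_append_right _ _ (by simp; omega)]
    rw [show (t + radius).toNat - (List.replicate (radius - m).toNat (-10:Int)).length - (List.replicate (t+m).toNat (0:Int)).length = 0 by simp; omega]
    rw [show (m+1-t+(radius-m)).toNat = (m-t+(radius-m)).toNat + 1 by omega, List.replicate_succ, List.set_cons_zero]
    rw [show ((0:Int) :: List.replicate (m-t+(radius-m)).toNat (-10)) = [0] ++ List.replicate (m-t+(radius-m)).toNat (-10) from rfl]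
    rw [← List.append_assoc (List.replicate (t+m).toNat (0:Int)) [0] _, ← List.replicate_succ']
    rw [show (t+m).toNat + 1 = (t+1+m).toNat by omega]
    have := ih (t+1) (by omega) (by omega)
    rw [show (m+1-(t+1)+(radius-m)).toNat = (m-t+(radius-m)).toNat by omega] at this
    exact this

-- the whole inner loop of A on a fresh -10 row produces B's closed-form row
theorem row_eq (radius i : Int) (h1 : -radius ≤ i) (h2 : i ≤ radius) :
    (PySem.List.pyRange (-radius) (radius+1) 1).foldl
      (fun row j => if |i| + |j| ≤ radius then PySem.List.pySetD row (j+radius) 0 else row)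
      (List.replicate (2*radius+1).toNat (-10))
    = List.replicate (|i|).toNat (-10) ++ List.replicate (2*(radius - |i|) + 1).toNat 0
        ++ List.replicate (|i|).toNat (-10) := by
  have hA0 : 0 ≤ |i| := abs_nonneg i
  have hAr : |i| ≤ radius := abs_le.mpr ⟨by omega, h2⟩
  generalize hA : |i| = A at *
  rw [PySem.List.pyRange_one_append (-radius) (-(radius - A)) (radius+1) (by omega) (by omega),
      List.foldl_append]
  rw [foldl_row_noop radius A _ (PySem.List.pyRange (-radius) (-(radius - A)) 1) (by
    intro j hj
    rw [PySem.List.mem_pyRange_one] at hj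
    rcases abs_cases j with ⟨h,h'⟩|⟨h,h'⟩ <;> rw [h] <;> omega)]
  rw [PySem.List.pyRange_one_append (-(radius-A)) ((radius-A)+1) (radius+1) (by omega) (by omega),
      List.foldl_append]
  have hcongr : ∀ (js : List Int), (∀ j ∈ js, A + |j| ≤ radius) → ∀ (row : List Int),
      js.foldl (fun row j => if A + |j| ≤ radius then PySem.List.pySetD row (j+radius) 0 else row) row
        = js.foldl (fun row j => PySem.List.pySetD row (j+radius) 0) row := by
    intro js
    induction js with
    | nil => intro _ _; rfl
    | cons j js ih =>
      intro h row
      simp only [List.foldl_cons, if_pos (h j (by simp))]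
      exact ih (fun x hx => h x (by simp [hx])) _
  rw [hcongr (PySem.List.pyRange (-(radius-A)) ((radius-A)+1) 1) (by
    intro j hj
    rw [PySem.List.mem_pyRange_one] at hj
    rcases abs_cases j with ⟨h,h'⟩|⟨h,h'⟩ <;> rw [h] <;> omega)]
  have hinit : List.replicate (2*radius+1).toNat (-10:Int)
      = List.replicate (radius-(radius-A)).toNat (-10)
        ++ (List.replicate ((-(radius-A))+(radius-A)).toNat 0
        ++ List.replicate ((radius-A)+1-(-(radius-A)) + (radius-(radius-A))).toNat (-10)) := by
    rw [show ((-(radius-A))+(radius-A)).toNat = 0 by omega]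
    simp only [List.replicate_zero, List.nil_append]
    rw [← List.replicate_add]
    congr 1
    omega
  rw [hinit]
  rw [foldl_row_mid radius (radius - A) (by omega) (by omega) (2*(radius-A)+1).toNat (-(radius-A))
      (by omega) (by omega)]
  rw [foldl_row_noop radius A _ (PySem.List.pyRange ((radius-A)+1) (radius+1) 1) (by
    intro j hj
    rw [PySem.List.mem_pyRange_one] at hj
    rcases abs_cases j with ⟨h,h'⟩|⟨h,h'⟩ <;> rw [h] <;> omega)]
  rw [show (radius-(radius-A)).toNat = A.toNat by omega,
      show (2*(radius-A)+1).toNat = (2*(radius-A)+1).toNat from rfl]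
  rw [List.append_assoc]

-- rewrite A's inner step (pySetD/pyGetD at nonnegative row index) into set/getD form
theorem inner_canon (radius i : Int) (hi : 0 ≤ i + radius) (js : List Int) (mat : List (List Int)) :
    js.foldl (fun m j => if |i| + |j| ≤ radius then
        PySem.List.pySetD m (i+radius) (PySem.List.pySetD (PySem.List.pyGetD m (i+radius) []) (j+radius) 0)
      else m) mat
    = js.foldl (fun m j => if |i| + |j| ≤ radius then
        m.set (i+radius).toNat (PySem.List.pySetD (m.getD (i+radius).toNat []) (j+radius) 0)
      else m) mat := by
  have hfun : (fun (m : List (List Int)) (j : Int) => if |i| + |j| ≤ radius then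
        PySem.List.pySetD m (i+radius) (PySem.List.pySetD (PySem.List.pyGetD m (i+radius) []) (j+radius) 0)
      else m)
      = (fun m j => if |i| + |j| ≤ radius then
        m.set (i+radius).toNat (PySem.List.pySetD (m.getD (i+radius).toNat []) (j+radius) 0)
      else m) := by
    funext m j
    by_cases hc : |i| + |j| ≤ radius
    · simp only [if_pos hc]
      rw [PySem.List.pySetD_of_nonneg _ _ hi]
      have hg : PySem.List.pyGetD m (i+radius) ([]:List Int) = m.getD (i+radius).toNat [] := by
        have := PySem.List.pyGetD_natCast (xs := m) (n := (i+radius).toNat) (d := ([]:List Int))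
        rw [Int.toNat_of_nonneg hi] at this
        exact this
      rw [hg]
    · simp only [if_neg hc]
  rw [hfun]

-- the outer loop fills the rows one by one
theorem outer (radius : Int) :
    ∀ (k : Nat) (t : Int) (pref : List (List Int)), -radius ≤ t → t + k = radius + 1 →
    pref.length = (t+radius).toNat →
    (PySem.List.pyRange t (radius+1) 1).foldl
      (fun m i => (PySem.List.pyRange (-radius) (radius+1) 1).foldl
        (fun m j => if |i| + |j| ≤ radius then
           PySem.List.pySetD m (i+radius) (PySem.List.pySetD (PySem.List.pyGetD m (i+radius) []) (j+radius) 0)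
         else m) m)
      (pref ++ List.replicate k (List.replicate (2*radius+1).toNat (-10)))
    = pref ++ (PySem.List.pyRange t (radius+1) 1).map
        (fun i => List.replicate (|i|).toNat (-10) ++ List.replicate (2*(radius - |i|) + 1).toNat 0
          ++ List.replicate (|i|).toNat (-10)) := by
  intro k
  induction k with
  | zero =>
    intro t pref h1 h2 h3
    rw [PySem.List.pyRange_one_eq_nil (show radius+1 ≤ t by omega)]
    simp
  | succ k ih =>
    intro t pref h1 h2 h3
    rw [PySem.List.pyRange_one_cons (by omega : t < radius+1), List.foldl_cons, List.map_cons]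
    rw [inner_canon radius t (by omega)]
    have hlen : (t+radius).toNat
        < (pref ++ List.replicate (k+1) (List.replicate (2*radius+1).toNat (-10:Int))).length := by
      simp only [List.length_append, List.length_replicate, h3]; omega
    rw [foldl_set_getD (fun j => |t| + |j| ≤ radius)
        (fun row j => PySem.List.pySetD row (j+radius) 0) (t+radius).toNat _ _ hlen]
    have hget : (pref ++ List.replicate (k+1) (List.replicate (2*radius+1).toNat (-10:Int))).getD
        (t+radius).toNat [] = List.replicate (2*radius+1).toNat (-10) := by
      rw [List.getD_eq_getElem _ _ hlen]
      rw [List.getElem_append_right (by omega)]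
      simp
    rw [hget, row_eq radius t (by omega) (by omega)]
    have hset : (pref ++ List.replicate (k+1) (List.replicate (2*radius+1).toNat (-10:Int))).set
        (t+radius).toNat
        (List.replicate (|t|).toNat (-10) ++ List.replicate (2*(radius - |t|) + 1).toNat 0
          ++ List.replicate (|t|).toNat (-10))
        = (pref ++ [List.replicate (|t|).toNat (-10) ++ List.replicate (2*(radius - |t|) + 1).toNat 0
          ++ List.replicate (|t|).toNat (-10)]) ++ List.replicate k (List.replicate (2*radius+1).toNat (-10)) := by
      rw [List.set_append_right _ _ (by omega)]
      rw [show (t+radius).toNat - pref.length = 0 by omega]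
      rw [List.replicate_succ, List.set_cons_zero]
      simp
    rw [hset]
    rw [ih (t+1) _ (by omega) (by omega) (by simp only [List.length_append, List.length_cons, List.length_nil, h3]; omega)]
    simp

theorem base_eq (radius : Int) :
    (PySem.List.pyRange (-radius) (radius+1) 1).foldl (fun m i =>
      (PySem.List.pyRange (-radius) (radius+1) 1).foldl (fun m j =>
        if |i| + |j| ≤ radius then
          PySem.List.pySetD m (i + radius)
            (PySem.List.pySetD (PySem.List.pyGetD m (i + radius) []) (j + radius) 0)
        else m) m)
      (List.replicate (2*radius+1).toNat (List.replicate (2*radius+1).toNat (-10)))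
    = (PySem.List.pyRange (-radius) (radius+1) 1).map (fun i =>
      List.replicate (|i|).toNat (-10)
        ++ List.replicate (2*(radius - |i|) + 1).toNat 0
        ++ List.replicate (|i|).toNat (-10)) := by
  by_cases h : 0 ≤ radius
  · have := outer radius (2*radius+1).toNat (-radius) [] (by omega) (by omega)
      (by simp only [List.length_nil]; omega)
    simpa using this
  · rw [PySem.List.pyRange_one_eq_nil (show radius+1 ≤ -radius by omega)]

    simp [show (2*radius+1).toNat = 0 by omega]

-- ===== VERDICT (by name: the statement is the Claim_ definition above) =====
theorem mat_from_coloring_spec : Claim_equal_mat_from_coloring := by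
  intro coloring radius _ _
  unfold Spec_mat_from_coloring mat_from_coloring mat_from_coloring_alt
  exact congrArg (applyColoring coloring radius) (base_eq radius)
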